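-- pv_equiv track=rewrite | github.com/PRINCEKUMAR2025/WhatsApp-Interview-Bot | conversational_handler.py | _identify_update_field
-- ===== SOURCE A (Python) =====
-- def _identify_update_field(message):
--     """Identify which field the user wants to update"""
--     if any(word in message for word in ['phone', 'number', 'mobile']):
--         return 'Candidate_Phone'
--     elif any(word in message for word in ['email', 'mail']):
--         return 'Candidate_Email'
--     elif any(word in message for word in ['address', 'location']):
--         return 'Candidate_Address'
--     elif any(word in message for word in ['name']):
--         return 'Candidate_Name'
--     return None
-- ===== SOURCE B (Python) =====
-- _KEYWORD_RANK = {
--     'phone': 0, 'number': 0, 'mobile': 0,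
--     'email': 1, 'mail': 1,
--     'address': 2, 'location': 2,
--     'name': 3,
-- }
-- _FIELDS = ['Candidate_Phone', 'Candidate_Email', 'Candidate_Address', 'Candidate_Name']
--
-- def _identify_update_field(message):
--     """Identify which field the user wants to update.
--
--     Evaluates every keyword test, collects the priority ranks of all matches,
--     and selects the best match arithmetically via min()."""
--     ranks = [rank for kw, rank in _KEYWORD_RANK.items() if kw in message]
--     return _FIELDS[min(ranks)] if ranks else None
-- ===== Notes on version B (the rewrite author's own statement) =====
-- stated objective: alternative
-- what changed: Replaced the short-circuiting if/elif ladder with exhaustive evaluation: collect the priority ranks of all matching keywords from a keyword-to-rank map, then select the answer arithmetically as the field at the minimum rank (None if no match).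
import Mathlib
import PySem

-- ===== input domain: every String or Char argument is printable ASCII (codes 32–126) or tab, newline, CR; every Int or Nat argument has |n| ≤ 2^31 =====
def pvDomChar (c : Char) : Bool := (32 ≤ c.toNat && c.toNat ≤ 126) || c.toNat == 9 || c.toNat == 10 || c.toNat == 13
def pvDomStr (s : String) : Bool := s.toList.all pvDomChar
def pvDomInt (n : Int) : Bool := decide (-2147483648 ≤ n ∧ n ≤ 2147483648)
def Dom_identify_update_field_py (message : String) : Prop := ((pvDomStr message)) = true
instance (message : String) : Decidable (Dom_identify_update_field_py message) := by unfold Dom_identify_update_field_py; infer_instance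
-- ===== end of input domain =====

-- B differs from A only in decomposition (exhaustive match collection + min rank vs short-circuit ladder); return values agree everywhere.

-- ===== PORT A =====
def identify_update_field_py (message : String) : Option String :=
  if ["phone", "number", "mobile"].any (fun w => PySem.Str.isIn w message) then
    some "Candidate_Phone"
  else if ["email", "mail"].any (fun w => PySem.Str.isIn w message) then
    some "Candidate_Email"
  else if ["address", "location"].any (fun w => PySem.Str.isIn w message) then
    some "Candidate_Address"
  else if ["name"].any (fun w => PySem.Str.isIn w message) then
    some "Candidate_Name"
  else none

-- ===== PORT B =====
-- B: keyword → priority rank map (insertion order), list of fields by rank;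
-- collect ranks of all matching keywords, answer = field at the minimum rank.
def keywordRank : List (String × Int) :=
  [("phone", 0), ("number", 0), ("mobile", 0),
   ("email", 1), ("mail", 1),
   ("address", 2), ("location", 2),
   ("name", 3)]

def fieldsList : List String :=
  ["Candidate_Phone", "Candidate_Email", "Candidate_Address", "Candidate_Name"]

def identify_update_field_py_alt (message : String) : Option String :=
  let ranks : List Int :=
    (keywordRank.filter (fun p => PySem.Str.isIn p.1 message)).map (fun p => p.2)
  match PySem.List.min? ranks (fun x => x) with
  | none => none
  | some r => PySem.List.pyGet? fieldsList r

-- ===== PRECONDITION & SPEC =====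
def Spec_identify_update_field_py (message : String) (out : Option String) : Prop := out = identify_update_field_py_alt message
instance (message : String) (out : Option String) : Decidable (Spec_identify_update_field_py message out) := by unfold Spec_identify_update_field_py; infer_instance

-- ===== CLAIM =====
def Claim_equal_identify_update_field_py : Prop := ∀ (message : String), Dom_identify_update_field_py message → Spec_identify_update_field_py message (identify_update_field_py message)

-- ===== LEMMAS AND PROOFS =====

-- ===== VERDICT =====
set_option maxHeartbeats 2000000 in
theorem identify_update_field_py_spec : Claim_equal_identify_update_field_py := by
  intro message _
  unfold Spec_identify_update_field_py identify_update_field_py identify_update_field_py_alt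
    keywordRank fieldsList
  simp only [List.any_cons, List.any_nil, List.filter_cons, List.filter_nil, Bool.or_false]
  cases h1 : PySem.Str.isIn "phone" message <;>
  cases h2 : PySem.Str.isIn "number" message <;>
  cases h3 : PySem.Str.isIn "mobile" message <;>
  cases h4 : PySem.Str.isIn "email" message <;>
  cases h5 : PySem.Str.isIn "mail" message <;>
  cases h6 : PySem.Str.isIn "address" message <;>
  cases h7 : PySem.Str.isIn "location" message <;>
  cases h8 : PySem.Str.isIn "name" message <;>
    simp [h1, h2, h3, h4, h5, h6, h7, h8, PySem.List.min?, PySem.List.pyGet?, PySem.List.pyIdx?,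
      PySem.List.min?_id_cons]
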